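-- pv_equiv track=rewrite | github.com/SanjayR857/DSA | Coding_Pratice/Leetcode_max_threenumber.py | max3_number
-- ===== SOURCE A (Python) =====
-- def max3_number(array):
--     max1,max2,max3=0,0,0
--     for num in (array):
--         if num>max1:
--             max3=max2
--             max2=max1
--             max1=num
--         elif num>max2:
--             max3=max2
--             max2=num
--         elif num>max3:
--             max3=num
--
--     return  (max1,max2,max3)
-- ===== SOURCE B (Python) =====
-- def max3_number(array):
--     top = sorted(list(array) + [0, 0, 0], reverse=True)
--     return (top[0], top[1], top[2])
-- ===== Notes on version B (the rewrite author's own statement) =====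
-- stated objective: simpler
-- what changed: Replaces the running three-way elif comparison chain with a single sort of the array padded by the three zero seeds, returning the first three elements of the descending order.
import Mathlib
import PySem

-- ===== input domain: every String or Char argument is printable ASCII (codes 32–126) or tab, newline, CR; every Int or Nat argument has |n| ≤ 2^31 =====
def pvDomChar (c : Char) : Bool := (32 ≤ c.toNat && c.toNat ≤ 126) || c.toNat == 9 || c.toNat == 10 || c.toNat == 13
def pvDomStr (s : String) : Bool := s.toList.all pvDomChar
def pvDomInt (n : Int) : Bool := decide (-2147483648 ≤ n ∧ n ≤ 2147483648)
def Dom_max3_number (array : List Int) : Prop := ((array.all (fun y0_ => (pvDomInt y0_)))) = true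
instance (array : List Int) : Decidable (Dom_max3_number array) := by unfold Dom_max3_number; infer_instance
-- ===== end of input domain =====

-- B replaces A's running three-way elif chain by one descending sort of the
-- zero-padded array, taking its first three elements (objective: simpler).

-- ===== PORT A =====
def max3_number (array : List Int) : Int × Int × Int :=
  array.foldl (fun (m : Int × Int × Int) num =>
    if num > m.1 then (num, m.1, m.2.1)
    else if num > m.2.1 then (m.1, num, m.2.1)
    else if num > m.2.2 then (m.1, m.2.1, num)
    else m) (0, 0, 0)

-- ===== PORT B =====
def max3_number_alt (array : List Int) : Int × Int × Int :=
  match PySem.List.sorted (array ++ [0, 0, 0]) (fun x => x) true with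
  | a :: b :: c :: _ => (a, b, c)
  | _ => (0, 0, 0)   -- unreachable: the sorted list has length ≥ 3

-- ===== PRECONDITION & SPEC =====
def Spec_max3_number (array : List Int) (out : Int × Int × Int) : Prop := out = max3_number_alt array
instance (array : List Int) (out : Int × Int × Int) : Decidable (Spec_max3_number array out) := by unfold Spec_max3_number; infer_instance

-- ===== CLAIM (what is proved, stated in full; the proofs are below) =====
def Claim_equal_max3_number : Prop := ∀ (array : List Int), Dom_max3_number array → Spec_max3_number array (max3_number array)

-- ===== LEMMAS AND PROOFS =====

/-- shorthand for the descending sort B uses -/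
def sD (l : List Int) : List Int := PySem.List.sorted l (fun x => x) true

theorem sD_sorted (l : List Int) : List.Pairwise (· ≥ ·) (sD l) :=
  PySem.List.sorted_pairwise_rev l (fun x => x)

theorem sD_perm (l : List Int) : (sD l).Perm l :=
  PySem.List.sorted_perm l (fun x => x) true

/-- descending sort is determined by the multiset -/
theorem sD_congr {l₁ l₂ : List Int} (h : l₁.Perm l₂) : sD l₁ = sD l₂ :=
  List.Perm.eq_of_pairwise' (sD_sorted l₁) (sD_sorted l₂)
    (((sD_perm l₁).trans h).trans (sD_perm l₂).symm)

/-- sorting a cons = ordered insertion into the sorted tail -/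
theorem sD_cons (x : Int) (l : List Int) :
    sD (x :: l) = List.orderedInsert (· ≥ ·) x (sD l) := by
  refine List.Perm.eq_of_pairwise' (sD_sorted _)
    (List.Pairwise.orderedInsert x _ (sD_sorted l)) ?_
  exact ((sD_perm _).trans (((sD_perm l).symm).cons x)).trans
    (List.perm_orderedInsert _ x (sD l)).symm

theorem sD_length (l : List Int) : (sD l).length = l.length :=
  (sD_perm l).length_eq

/-- A's fold step applied to the first three of a descending list headed a::b::c
    equals the first three after ordered insertion. -/
theorem step_insert (x a b c : Int) (r : List Int) (hab : a ≥ b) (hbc : b ≥ c) :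
    (match List.orderedInsert (· ≥ ·) x (a :: b :: c :: r) with
      | a :: b :: c :: _ => ((a : Int), (b : Int), (c : Int))
      | _ => (0, 0, 0)) =
    (if x > a then (x, a, b)
     else if x > b then (a, x, b)
     else if x > c then (a, b, x)
     else (a, b, c)) := by
  simp only [List.orderedInsert]
  split_ifs with h1 h2 h3 <;> simp_all <;> omega

theorem alt_append (l : List Int) (x : Int) :
    max3_number_alt (l ++ [x]) =
      (if x > (max3_number_alt l).1 then (x, (max3_number_alt l).1, (max3_number_alt l).2.1)
       else if x > (max3_number_alt l).2.1 then ((max3_number_alt l).1, x, (max3_number_alt l).2.1)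
       else if x > (max3_number_alt l).2.2 then ((max3_number_alt l).1, (max3_number_alt l).2.1, x)
       else max3_number_alt l) := by
  show (match sD ((l ++ [x]) ++ [0,0,0]) with
        | a :: b :: c :: _ => (a, b, c) | _ => ((0:Int), (0:Int), (0:Int))) = _
  have hperm : ((l ++ [x]) ++ [0,0,0]).Perm (x :: (l ++ [0,0,0])) := by
    rw [List.append_assoc]; exact List.perm_middle
  rw [sD_congr hperm, sD_cons]
  -- the sorted padded list has at least three elements
  have hlen : 3 ≤ (sD (l ++ [0,0,0])).length := by
    rw [sD_length]; simp
  obtain ⟨a, b, c, r, hs⟩ : ∃ a b c r, sD (l ++ [0,0,0]) = a :: b :: c :: r := by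
    match h : sD (l ++ [0,0,0]) with
    | a :: b :: c :: r => exact ⟨a, b, c, r, rfl⟩
    | [] => rw [h] at hlen; simp at hlen
    | [a] => rw [h] at hlen; simp at hlen
    | [a, b] => rw [h] at hlen; simp at hlen
  have hsorted := sD_sorted (l ++ [0,0,0])
  rw [hs] at hsorted
  have hab : a ≥ b := (List.pairwise_cons.mp hsorted).1 b (by simp)
  have hbc : b ≥ c := (List.pairwise_cons.mp (List.pairwise_cons.mp hsorted).2).1 c (by simp)
  have halt : max3_number_alt l = (a, b, c) := by
    show (match sD (l ++ [0,0,0]) with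
          | a :: b :: c :: _ => (a, b, c) | _ => ((0:Int), (0:Int), (0:Int))) = _
    rw [hs]
  rw [hs, step_insert x a b c r hab hbc, halt]

theorem main_eq (l : List Int) : max3_number l = max3_number_alt l := by
  induction l using List.reverseRecOn with
  | nil => decide
  | append_singleton l x ih =>
    rw [alt_append]
    show (l ++ [x]).foldl _ (0,0,0) = _
    rw [List.foldl_append, show l.foldl _ (0,0,0) = max3_number l from rfl, ih]
    simp only [List.foldl]

-- ===== VERDICT (by name: the statement is the Claim_ definition above) =====
theorem max3_number_spec : Claim_equal_max3_number := by
  intro array _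
  show max3_number array = max3_number_alt array
  exact main_eq array
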